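-- pv_equiv track=rewrite | github.com/GaibVargas/trabalho-final-formais | main.py | fixFirstProd
-- ===== SOURCE A (Python) =====
-- def fixFirstProd(productions):
--     first_value = list(productions)[-1]
--     isLeftRecursive = False
--     for sentence in productions[first_value]:
--         if sentence[0] == first_value:
--             isLeftRecursive = True
--             break
--     if isLeftRecursive:
--         new_dic = productions.copy()
--         # Is left recursive, remove the first symbol
--         newKeyValue = first_value + "'"
--         while newKeyValue in new_dic:
--             newKeyValue = newKeyValue + "'"
--         recursive_values = []
--         not_recursive_values = []
--         for sentence in productions[first_value]:
--             if sentence[0] == first_value: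
--                 # A -> Aa
--                 recursive_values.append(sentence[1:] + newKeyValue)
--             else:
--                 # E -> ab | EC
--                 # E -> abE'
--                 not_recursive_values.append(sentence + newKeyValue)
--         recursive_values.append("&")
--         new_dic[first_value] = not_recursive_values
--         new_dic[newKeyValue] = recursive_values
--         return new_dic
--     else:
--         return productions
-- ===== SOURCE B (Python) =====
-- def _split(key, sentences):
--     # recursive partition: (recursive tails, non-recursive sentences), built back-to-front
--     if not sentences:
--         return [], []
--     rec, non = _split(key, sentences[1:])
--     s = sentences[0]
--     if s[0] == key:
--         return [s[1:]] + rec, non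
--     return rec, [s] + non
--
--
-- def fixFirstProd(productions):
--     first_value = next(reversed(productions))
--     rec, non = _split(first_value, productions[first_value])
--     if not rec:
--         return productions
--     # fresh key: index all prime-run suffix lengths already used in one pass,
--     # then take the smallest positive count not in that set
--     used = {len(k) - len(first_value) for k in productions
--             if len(k) > len(first_value) and k.startswith(first_value)
--             and all(c == "'" for c in k[len(first_value):])}
--     n = 1
--     while n in used:
--         n += 1
--     new_key = first_value + "'" * n
--     new_dic = dict(productions)
--     new_dic[first_value] = [s + new_key for s in non]
--     new_dic[new_key] = [s + new_key for s in rec] + ["&"]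
--     return new_dic
-- ===== Notes on version B (the rewrite author's own statement) =====
-- stated objective: alternative
-- what changed: Replaces A's probe-until-free fresh-key while loop (repeated membership tests of ever-longer primed candidates) by a one-pass index of the prime-suffix lengths already used among the keys followed by a smallest-free-count search, and replaces A's flag-scan plus two-accumulator partition loop by a single recursive partition built back-to-front whose emptiness decides recursion, with the new-key suffix appended afterwards.
-- outside the precondition, e.g. on fixFirstProd({}): A raises IndexError, B raises StopIteration; on fixFirstProd({'E': ['Ea', '']}): A raises IndexError, B raises IndexError
import Mathlib
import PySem

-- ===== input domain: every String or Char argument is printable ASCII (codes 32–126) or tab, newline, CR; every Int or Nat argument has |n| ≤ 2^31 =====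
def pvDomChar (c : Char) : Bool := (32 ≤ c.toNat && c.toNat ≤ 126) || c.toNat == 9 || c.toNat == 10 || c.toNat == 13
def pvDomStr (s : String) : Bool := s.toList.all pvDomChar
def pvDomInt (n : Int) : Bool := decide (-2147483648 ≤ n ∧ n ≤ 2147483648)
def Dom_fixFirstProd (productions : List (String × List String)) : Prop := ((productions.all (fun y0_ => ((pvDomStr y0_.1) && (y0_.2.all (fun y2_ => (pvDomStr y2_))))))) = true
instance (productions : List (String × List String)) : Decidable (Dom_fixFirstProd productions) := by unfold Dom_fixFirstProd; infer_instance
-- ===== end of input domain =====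

-- B replaces A's probe-until-free fresh-key loop by a one-pass index of the prime-suffix lengths
-- already used (then the smallest free count) and A's flag-scan + two-accumulator partition loop by
-- one recursive partition built back-to-front, suffixing afterwards; equal return values.

-- ===== PORT A =====
-- s[0] == first_value  (Python compares the one-character string s[0]; empty s is outside Pre_)
def pvHeadIs (fv s : String) : Bool :=
  ((PySem.Str.pyGet? s 0).map (fun c => String.ofList [c])) == some fv

-- A's while loop: candidate grows by "'" while it is a key; fuel keys.length+1 is exact because the
-- candidates are pairwise distinct strings, so at most keys.length of them can be keys.
def pvFreshA (keys : List String) : String → Nat → String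
  | cand, 0 => cand
  | cand, n + 1 => if keys.contains cand then pvFreshA keys (cand ++ "'") n else cand

def fixFirstProd (productions : List (String × List String)) : List (String × List String) :=
  let d := PySem.Dict.ofList productions
  match PySem.List.pyGet? d.keys (-1) with
  | none => d.items      -- list(productions)[-1] raises IndexError on an empty dict (outside Pre_)
  | some fv =>
    let bucket := (d.get? fv).getD []   -- productions[first_value]; fv is a key, so get? is some
    let isLeftRecursive := bucket.any (pvHeadIs fv)   -- the for-with-break flag loop
    if isLeftRecursive then
      let nk := pvFreshA d.keys (fv ++ "'") (d.keys.length + 1)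
      let pr := bucket.foldl (fun (st : List String × List String) s =>
          if pvHeadIs fv s then (st.1 ++ [PySem.Str.slice s (some 1) none ++ nk], st.2)
          else (st.1, st.2 ++ [s ++ nk])) ([], [])
      ((d.insert fv pr.2).insert nk (pr.1 ++ ["&"])).items
    else d.items

-- ===== PORT B =====
-- _split: recursive partition of the sentences into (recursive tails, non-recursive sentences)
def pvSplit (key : String) : List String → List String × List String
  | [] => ([], [])
  | s :: rest =>
    let p := pvSplit key rest
    if pvHeadIs key s then (PySem.Str.slice s (some 1) none :: p.1, p.2)
    else (p.1, s :: p.2)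

-- Source B's set-comprehension guard: len(k) > len(fv) and k.startswith(fv) and all(c == "'" for c in k[len(fv):])
-- (the slice k[len(fv):] is taken on the code-point list, exact for every string)
def pvPrimed (fv k : String) : Bool :=
  decide (fv.toList.length < k.toList.length) && PySem.Str.startswith k fv &&
    (PySem.List.slice k.toList (some ((fv.toList.length : Int))) none).all (fun c => c == '\'')

-- the set comprehension {len(k) - len(fv) for k in productions if …}
def pvUsed (keys : List String) (fv : String) : PySem.Set Nat :=
  PySem.Set.ofList ((keys.filter (pvPrimed fv)).map (fun k => k.toList.length - fv.toList.length))

-- Source B's 'while n in used: n += 1'; fuel keys.length+1 is exact: used has at most keys.length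
-- elements, so among the keys.length+1 probed values one is free.
def pvLeastFree (used : PySem.Set Nat) : Nat → Nat → Nat
  | n, 0 => n
  | n, fuel + 1 => if PySem.Set.contains used n then pvLeastFree used (n + 1) fuel else n

-- "'" * n
def pvPrimes (n : Nat) : String := String.ofList (List.replicate n '\'')

def fixFirstProd_alt (productions : List (String × List String)) : List (String × List String) :=
  let d := PySem.Dict.ofList productions
  match d.keys.getLast? with   -- next(reversed(productions)); StopIteration on an empty dict (outside Pre_)
  | none => d.items
  | some fv =>
    let p := pvSplit fv ((d.get? fv).getD [])
    if p.1 = [] then d.items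
    else
      let n := pvLeastFree (pvUsed d.keys fv) 1 (d.keys.length + 1)
      let nk := fv ++ pvPrimes n
      ((d.insert fv (p.2.map (fun s => s ++ nk))).insert nk
          (p.1.map (fun s => s ++ nk) ++ ["&"])).items

-- ===== PRECONDITION & SPEC =====
-- Pre_ excludes exactly the inputs where the Python raises: the empty dict (IndexError on
-- list(productions)[-1]) and an empty sentence in the last key's list (IndexError on sentence[0]).
def Pre_fixFirstProd (productions : List (String × List String)) : Prop :=
  productions ≠ [] ∧
  ∀ fv ∈ (PySem.Dict.ofList productions).keys.getLast?,
    "" ∉ ((PySem.Dict.ofList productions).get? fv).getD []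
instance (productions : List (String × List String)) : Decidable (Pre_fixFirstProd productions) := by
  unfold Pre_fixFirstProd; infer_instance

def pvWitness_fixFirstProd : (List (String × List String)) :=
  [("S", ["a"]), ("E", ["Ea", "b"])]

def Spec_fixFirstProd (productions : List (String × List String)) (out : List (String × List String)) : Prop := out = fixFirstProd_alt productions
instance (productions : List (String × List String)) (out : List (String × List String)) : Decidable (Spec_fixFirstProd productions out) := by unfold Spec_fixFirstProd; infer_instance

-- ===== CLAIM (what is proved, stated in full; the proofs are below) =====
def Claim_equal_fixFirstProd : Prop := ∀ (productions : List (String × List String)), Dom_fixFirstProd productions → Pre_fixFirstProd productions → Spec_fixFirstProd productions (fixFirstProd productions)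

-- ===== LEMMAS AND PROOFS =====

theorem pvPrimes_toList (n : Nat) : (pvPrimes n).toList = List.replicate n '\'' := by
  simp [pvPrimes]

theorem pvPrimes_succ (n : Nat) : pvPrimes n ++ "'" = pvPrimes (n + 1) := by
  apply String.toList_inj.mp
  simp [pvPrimes_toList, List.replicate_succ']

-- a key equals fv ++ "'"*j (j ≥ 1) exactly when Source B's comprehension guard accepts it with length gap j
theorem pvPrimed_char (fv k : String) (j : Nat) (hj : 1 ≤ j) :
    (k = fv ++ pvPrimes j) ↔
      (pvPrimed fv k = true ∧ k.toList.length - fv.toList.length = j) := by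
  constructor
  · rintro rfl
    have hT : (fv ++ pvPrimes j).toList = fv.toList ++ List.replicate j '\'' := by
      simp [pvPrimes_toList]
    refine ⟨?_, by simp [hT]⟩
    simp only [pvPrimed, Bool.and_eq_true, decide_eq_true_eq, hT]
    refine ⟨⟨by simp; omega, ?_⟩, ?_⟩
    · rw [PySem.Str.startswith_eq]
      exact (PySem.Chars.startswith_iff _ _).mpr (by rw [hT]; exact List.prefix_append _ _)
    · rw [PySem.List.slice_from_natCast, List.drop_left]
      exact List.all_eq_true.mpr (fun c hc => by simp [List.eq_of_mem_replicate hc])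
  · rintro ⟨hp, hlen⟩
    simp only [pvPrimed, Bool.and_eq_true, decide_eq_true_eq] at hp
    obtain ⟨⟨hlt, hsw⟩, hall⟩ := hp
    rw [PySem.Str.startswith_eq] at hsw
    obtain ⟨t, ht⟩ := (PySem.Chars.startswith_iff _ _).mp hsw
    rw [PySem.List.slice_from_natCast, ← ht, List.drop_left] at hall
    have htlen : t.length = j := by
      have := congrArg List.length ht
      rw [List.length_append] at this
      omega
    have : t = List.replicate j '\'' := by
      rw [List.eq_replicate_iff]
      exact ⟨htlen, fun c hc => by simpa using List.all_eq_true.mp hall c hc⟩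
    apply String.toList_inj.mp
    rw [← ht, this]
    simp [pvPrimes_toList]

-- the two membership tests agree: probing fv ++ "'"*j among the keys = testing j in Source B's used set
theorem pvCond_eq (keys : List String) (fv : String) (j : Nat) (hj : 1 ≤ j) :
    keys.contains (fv ++ pvPrimes j) = PySem.Set.contains (pvUsed keys fv) j := by
  have hmem : (fv ++ pvPrimes j) ∈ keys ↔
      j ∈ (keys.filter (pvPrimed fv)).map (fun k => k.toList.length - fv.toList.length) := by
    simp only [List.mem_map, List.mem_filter]
    constructor
    · intro hk
      exact ⟨fv ++ pvPrimes j, ⟨hk, ((pvPrimed_char fv _ j hj).mp rfl).1⟩,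
        ((pvPrimed_char fv _ j hj).mp rfl).2⟩
    · rintro ⟨k, ⟨hk, hp⟩, hl⟩
      rwa [(pvPrimed_char fv k j hj).mpr ⟨hp, hl⟩] at hk
  have hused : j ∈ pvUsed keys fv ↔
      j ∈ (keys.filter (pvPrimed fv)).map (fun k => k.toList.length - fv.toList.length) :=
    PySem.Set.mem_ofList _ _
  rw [Bool.eq_iff_iff]
  simp only [PySem.Set.contains, List.contains_iff_mem]
  rw [hmem, ← hused]

-- the two fresh-key loops agree step for step (A carries the candidate, B the prime count)
theorem pvFresh_eq (keys : List String) (fv : String) :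
    ∀ (fuel : Nat) (j : Nat), 1 ≤ j →
      pvFreshA keys (fv ++ pvPrimes j) fuel =
        fv ++ pvPrimes (pvLeastFree (pvUsed keys fv) j fuel) := by
  intro fuel
  induction fuel with
  | zero => intro j _; rfl
  | succ n ih =>
    intro j hj
    show (if keys.contains (fv ++ pvPrimes j) then pvFreshA keys ((fv ++ pvPrimes j) ++ "'") n
          else fv ++ pvPrimes j)
        = fv ++ pvPrimes (if PySem.Set.contains (pvUsed keys fv) j
            then pvLeastFree (pvUsed keys fv) (j + 1) n else j)
    rw [pvCond_eq keys fv j hj]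
    split_ifs with h
    · rw [String.append_assoc, pvPrimes_succ]; exact ih (j + 1) (by omega)
    · rfl

-- B's recursive partition, characterised by filters
theorem pvSplit_eq (key : String) (l : List String) :
    pvSplit key l = ((l.filter (pvHeadIs key)).map (fun s => PySem.Str.slice s (some 1) none),
      l.filter (fun s => !(pvHeadIs key s))) := by
  induction l with
  | nil => rfl
  | cons x xs ih =>
    by_cases hx : pvHeadIs key x
    · simp [pvSplit, hx, ih]
    · simp [pvSplit, hx, ih]

-- A's two-accumulator partition loop, characterised by filters
theorem pvPart (p : String → Bool) (g h : String → String) :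
    ∀ (l : List String) (r0 n0 : List String),
      l.foldl (fun (st : List String × List String) s =>
          if p s then (st.1 ++ [g s], st.2) else (st.1, st.2 ++ [h s])) (r0, n0)
        = (r0 ++ (l.filter p).map g, n0 ++ (l.filter (fun s => !p s)).map h) := by
  intro l
  induction l with
  | nil => intro r0 n0; simp
  | cons x xs ih =>
    intro r0 n0
    by_cases hx : p x
    · simp [List.foldl_cons, hx, ih]
    · simp [List.foldl_cons, hx, ih]

-- ===== VERDICT (by name: the statement is the Claim_ definition above) =====
theorem fixFirstProd_spec : Claim_equal_fixFirstProd := by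
  intro productions _ _
  unfold Spec_fixFirstProd fixFirstProd fixFirstProd_alt
  simp only [PySem.List.pyGet?_neg_one]
  cases hlast : (PySem.Dict.ofList productions).keys.getLast? with
  | none => rfl
  | some fv =>
    simp only [pvSplit_eq]
    by_cases hrec : ((((PySem.Dict.ofList productions).get? fv).getD []).any (pvHeadIs fv)) = true
    · have hne : ((((PySem.Dict.ofList productions).get? fv).getD []).filter (pvHeadIs fv)).map
          (fun s => PySem.Str.slice s (some 1) none) ≠ [] := by
        rcases List.any_eq_true.mp hrec with ⟨s, hs, hps⟩
        simp only [ne_eq, List.map_eq_nil_iff, List.filter_eq_nil_iff]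
        intro hall
        exact absurd hps (by simpa using hall s hs)
      have hfresh : pvFreshA (PySem.Dict.ofList productions).keys (fv ++ "'")
          ((PySem.Dict.ofList productions).keys.length + 1)
          = fv ++ pvPrimes (pvLeastFree (pvUsed (PySem.Dict.ofList productions).keys fv) 1
              ((PySem.Dict.ofList productions).keys.length + 1)) := by
        have h1 : (fv ++ "'") = fv ++ pvPrimes 1 := by rfl
        rw [h1]
        exact pvFresh_eq _ fv _ 1 (le_refl 1)
      simp only [hrec, if_true, pvPart, hfresh, List.nil_append]
      rw [if_neg hne]
      simp [Function.comp_def]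
    · have hnil : ((((PySem.Dict.ofList productions).get? fv).getD []).filter (pvHeadIs fv)).map
          (fun s => PySem.Str.slice s (some 1) none) = [] := by
        simp only [List.map_eq_nil_iff, List.filter_eq_nil_iff]
        intro s hs
        simpa using List.any_eq_false.mp (Bool.of_not_eq_true hrec) s hs
      rw [Bool.not_eq_true] at hrec
      simp only [hrec, Bool.false_eq_true, if_false]
      rw [if_pos hnil]
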